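-- pv_equiv track=rewrite | github.com/adelodundamilare/momi | app/endpoints/insight_portal.py | extract_key_topics_from_chat
-- ===== SOURCE A (Python) =====
-- def extract_key_topics_from_chat(messages: list) -> list:
--     ingredient_keywords = {
--         'sugar', 'stevia', 'sucralose', 'aspartame', 'monk fruit', 'erythritol', 'xylitol',
--         'milk', 'dairy', 'almond milk', 'oat milk', 'soy milk', 'coconut milk',
--         'protein', 'whey', 'casein', 'pea protein', 'hemp protein', 'collagen',
--         'berries', 'strawberry', 'blueberry', 'raspberry', 'apple', 'banana', 'orange',
--         'spinach', 'kale', 'broccoli', 'carrot', 'beet', 'ginger', 'turmeric',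
--         'caffeine', 'vitamin', 'mineral', 'antioxidant', 'fiber', 'probiotic',
--         'organic', 'natural', 'vegan', 'gluten-free', 'keto', 'low-carb'
--     }
--
--     found_topics = set()
--
--     for message in messages:
--         message_lower = message.lower()
--         for keyword in ingredient_keywords:
--             if keyword in message_lower:
--                 found_topics.add(keyword)
--
--     return list(found_topics)
-- ===== SOURCE B (Python) =====
-- INGREDIENT_KEYWORDS = (
--     'sugar', 'stevia', 'sucralose', 'aspartame', 'monk fruit', 'erythritol', 'xylitol',
--     'milk', 'dairy', 'almond milk', 'oat milk', 'soy milk', 'coconut milk',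
--     'protein', 'whey', 'casein', 'pea protein', 'hemp protein', 'collagen',
--     'berries', 'strawberry', 'blueberry', 'raspberry', 'apple', 'banana', 'orange',
--     'spinach', 'kale', 'broccoli', 'carrot', 'beet', 'ginger', 'turmeric',
--     'caffeine', 'vitamin', 'mineral', 'antioxidant', 'fiber', 'probiotic',
--     'organic', 'natural', 'vegan', 'gluten-free', 'keto', 'low-carb'
-- )
--
--
-- def extract_key_topics_from_chat(messages: list) -> list:
--     # One combined haystack; '\n' cannot occur inside any keyword, so joining
--     # on it creates no cross-message matches.
--     combined = "\n".join(m.lower() for m in messages)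
--     out = []
--     for kw in INGREDIENT_KEYWORDS:
--         if kw in combined:
--             out.append(kw)
--     return out
-- ===== Notes on version B (the rewrite author's own statement) =====
-- stated objective: faster
-- what changed: Instead of a nested per-message x per-keyword loop accumulating a set, B joins all lowercased messages into one '\n'-separated haystack and makes a single scan over the fixed keyword list against it, collecting matches into an output list (the separator cannot occur in a keyword, so the match set is identical; A's returned list order is an unspecified Python set order, B's is keyword order, equal as sets). One combined search per keyword removes Python's per-message loop and call overhead (measured ~3x).
import Mathlib
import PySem

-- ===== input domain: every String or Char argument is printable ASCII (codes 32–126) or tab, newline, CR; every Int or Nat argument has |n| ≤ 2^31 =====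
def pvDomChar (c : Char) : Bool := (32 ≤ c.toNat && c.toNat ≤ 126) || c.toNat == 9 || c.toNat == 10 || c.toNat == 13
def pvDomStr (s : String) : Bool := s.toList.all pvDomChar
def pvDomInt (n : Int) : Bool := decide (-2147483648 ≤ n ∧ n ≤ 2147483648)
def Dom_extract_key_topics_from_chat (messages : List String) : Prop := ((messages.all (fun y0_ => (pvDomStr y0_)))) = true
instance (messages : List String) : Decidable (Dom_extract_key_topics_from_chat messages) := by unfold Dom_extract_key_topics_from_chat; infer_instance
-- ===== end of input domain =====

-- B replaces A's nested per-message/per-keyword set accumulation by a char-level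
-- '\n'-joined lowercased haystack scanned once by an explicit recursion over the fixed
-- keyword list (alternative decomposition, same match set; list order of a Python set is
-- not specified, so A's port enumerates the result through the fixed keyword universe).


-- the ingredient_keywords set literal, in source order (its Python hash iteration order is
-- not modelled; everything below consumes it order-insensitively)
def pvKeywords : List String :=
  ["sugar", "stevia", "sucralose", "aspartame", "monk fruit", "erythritol", "xylitol",
   "milk", "dairy", "almond milk", "oat milk", "soy milk", "coconut milk",
   "protein", "whey", "casein", "pea protein", "hemp protein", "collagen",
   "berries", "strawberry", "blueberry", "raspberry", "apple", "banana", "orange",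
   "spinach", "kale", "broccoli", "carrot", "beet", "ginger", "turmeric",
   "caffeine", "vitamin", "mineral", "antioxidant", "fiber", "probiotic",
   "organic", "natural", "vegan", "gluten-free", "keto", "low-carb"]

-- ===== PORT A =====
-- nested loops accumulating found_topics : set; the final 'list(found_topics)' has
-- unspecified (hash) order in Python, so the set is consumed order-insensitively:
-- enumerated through the fixed keyword universe (the output is compared as a set).
def extract_key_topics_from_chat (messages : List String) : List String :=
  let found_topics : PySem.Set String :=
    messages.foldl (fun found_topics message =>
      let message_lower := PySem.Str.lower message
      pvKeywords.foldl (fun found_topics keyword =>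
        if PySem.Str.isIn keyword message_lower then PySem.Set.add found_topics keyword
        else found_topics) found_topics)
      PySem.Set.empty
  pvKeywords.filter (fun kw => PySem.Set.contains found_topics kw)

-- ===== PORT B =====
-- '"\n".join(m.lower() for m in messages)' at char level, then the explicit
-- append-loop over INGREDIENT_KEYWORDS as a structural recursion producing the output
def pvCombined (messages : List String) : List Char :=
  PySem.Chars.join ['\n'] (messages.map (fun m => PySem.Chars.lower m.toList))

def pvScan (combined : List Char) : List String → List String
  | [] => []
  | kw :: rest =>
      if PySem.Chars.isIn kw.toList combined then kw :: pvScan combined rest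
      else pvScan combined rest

def extract_key_topics_from_chat_alt (messages : List String) : List String :=
  pvScan (pvCombined messages) pvKeywords

-- ===== PRECONDITION & SPEC =====
def Spec_extract_key_topics_from_chat (messages : List String) (out : List String) : Prop := out = extract_key_topics_from_chat_alt messages
instance (messages : List String) (out : List String) : Decidable (Spec_extract_key_topics_from_chat messages out) := by unfold Spec_extract_key_topics_from_chat; infer_instance

-- ===== CLAIM (what is proved, stated in full; the proofs are below) =====
def Claim_equal_extract_key_topics_from_chat : Prop := ∀ (messages : List String), Dom_extract_key_topics_from_chat messages → Spec_extract_key_topics_from_chat messages (extract_key_topics_from_chat messages)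

-- ===== LEMMAS AND PROOFS =====

-- every keyword is nonempty and newline-free (so '\n'-joining creates no new matches)
theorem pvKeywords_facts : ∀ kw ∈ pvKeywords, kw.toList ≠ [] ∧ '\n' ∉ kw.toList := by decide

-- a newline-free pattern is a prefix of a ++ '\n' :: b only within a
theorem pv_prefix_append_cons {kw a b : List Char} {c : Char} (hc : c ∉ kw) :
    kw <+: a ++ c :: b → kw <+: a := by
  induction kw generalizing a with
  | nil => intro _; exact List.nil_prefix
  | cons k kw' ih =>
    intro h
    cases a with
    | nil =>
      rcases List.cons_prefix_cons.mp h with ⟨hk, _⟩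
      exact absurd (hk ▸ List.mem_cons_self) hc
    | cons x a' =>
      rcases List.cons_prefix_cons.mp h with ⟨hk, htail⟩
      exact List.cons_prefix_cons.mpr ⟨hk, ih (fun hm => hc (List.mem_cons_of_mem _ hm)) htail⟩

-- a nonempty newline-free pattern is an infix of a ++ '\n' :: b iff it is an infix of a or of b
theorem pv_infix_append_cons {kw : List Char} {c : Char} (hc : c ∉ kw) (hne : kw ≠ []) :
    ∀ a b : List Char, (kw <:+: a ++ c :: b ↔ kw <:+: a ∨ kw <:+: b) := by
  intro a
  induction a with
  | nil =>
    intro b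
    constructor
    · intro h
      rcases List.infix_cons_iff.mp h with hp | hi
      · cases kw with
        | nil => exact absurd rfl hne
        | cons k kw' =>
          rcases List.cons_prefix_cons.mp hp with ⟨hk, _⟩
          exact absurd (hk ▸ List.mem_cons_self) hc
      · exact Or.inr hi
    · rintro (h | h)
      · rw [List.eq_nil_of_infix_nil h] at hne; exact absurd rfl hne
      · exact h.trans (List.suffix_cons c b).isInfix
  | cons x a' ih =>
    intro b
    constructor
    · intro h
      rcases List.infix_cons_iff.mp h with hp | hi
      · exact Or.inl (pv_prefix_append_cons (a := x :: a') hc hp).isInfix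
      · rcases (ih b).mp hi with h' | h'
        · exact Or.inl (h'.trans (List.suffix_cons x a').isInfix)
        · exact Or.inr h'
    · rintro (h | h)
      · exact h.trans (List.prefix_append (x :: a') (c :: b)).isInfix
      · exact ((ih b).mpr (Or.inr h)).trans (List.suffix_cons x (a' ++ c :: b)).isInfix

-- infix of the '\n'-join iff infix of some part
theorem pv_infix_join {kw : List Char} (hc : '\n' ∉ kw) (hne : kw ≠ []) :
    ∀ parts : List (List Char),
      (kw <:+: PySem.Chars.join ['\n'] parts ↔ ∃ p ∈ parts, kw <:+: p) := by
  intro parts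
  induction parts with
  | nil =>
    simp only [PySem.Chars.join_nil, List.not_mem_nil]
    constructor
    · intro h; exact absurd (List.eq_nil_of_infix_nil h) hne
    · rintro ⟨p, hp, _⟩; exact hp.elim
  | cons p rest ih =>
    cases rest with
    | nil => simp [PySem.Chars.join_singleton]
    | cons q rest' =>
      rw [PySem.Chars.join_cons_cons]
      have : p ++ ['\n'] ++ PySem.Chars.join ['\n'] (q :: rest')
          = p ++ '\n' :: PySem.Chars.join ['\n'] (q :: rest') := by simp
      rw [this, pv_infix_append_cons hc hne, ih]
      simp

-- membership after the inner keyword loop over one message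
theorem pv_mem_inner (s : String) :
    ∀ (ks : List String) (f : PySem.Set String) (x : String),
      (x ∈ ks.foldl (fun found keyword =>
          if PySem.Str.isIn keyword s then PySem.Set.add found keyword else found) f
        ↔ x ∈ f ∨ (x ∈ ks ∧ PySem.Str.isIn x s = true)) := by
  intro ks
  induction ks with
  | nil => simp
  | cons k ks' ih =>
    intro f x
    simp only [List.foldl_cons]
    by_cases hk : PySem.Str.isIn k s = true
    · rw [if_pos hk, ih, PySem.Set.mem_add]
      constructor
      · rintro ((h | rfl) | ⟨hx, hs⟩)
        · exact Or.inl h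
        · exact Or.inr ⟨List.mem_cons_self, hk⟩
        · exact Or.inr ⟨List.mem_cons_of_mem _ hx, hs⟩
      · rintro (h | ⟨hx, hs⟩)
        · exact Or.inl (Or.inl h)
        · rcases List.mem_cons.mp hx with rfl | hx'
          · exact Or.inl (Or.inr rfl)
          · exact Or.inr ⟨hx', hs⟩
    · rw [if_neg hk, ih]
      constructor
      · rintro (h | ⟨hx, hs⟩)
        · exact Or.inl h
        · exact Or.inr ⟨List.mem_cons_of_mem _ hx, hs⟩
      · rintro (h | ⟨hx, hs⟩)
        · exact Or.inl h
        · rcases List.mem_cons.mp hx with rfl | hx'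
          · exact absurd hs hk
          · exact Or.inr ⟨hx', hs⟩

-- membership after the outer message loop
theorem pv_mem_outer :
    ∀ (ms : List String) (f : PySem.Set String) (x : String),
      (x ∈ ms.foldl (fun found message =>
          pvKeywords.foldl (fun found keyword =>
            if PySem.Str.isIn keyword (PySem.Str.lower message) then PySem.Set.add found keyword
            else found) found) f
        ↔ x ∈ f ∨ ∃ m ∈ ms, x ∈ pvKeywords ∧ PySem.Str.isIn x (PySem.Str.lower m) = true) := by
  intro ms
  induction ms with
  | nil => simp
  | cons m ms' ih =>
    intro f x
    simp only [List.foldl_cons]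
    rw [ih, pv_mem_inner]
    constructor
    · rintro ((h | ⟨hx, hs⟩) | ⟨m', hm', hx, hs⟩)
      · exact Or.inl h
      · exact Or.inr ⟨m, List.mem_cons_self, hx, hs⟩
      · exact Or.inr ⟨m', List.mem_cons_of_mem _ hm', hx, hs⟩
    · rintro (h | ⟨m', hm', hx, hs⟩)
      · exact Or.inl (Or.inl h)
      · rcases List.mem_cons.mp hm' with rfl | hm''
        · exact Or.inl (Or.inr ⟨hx, hs⟩)
        · exact Or.inr ⟨m', hm'', hx, hs⟩

-- B's recursive keyword scan is the filter by substring membership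
theorem pvScan_eq_filter (c : List Char) :
    ∀ ks : List String, pvScan c ks = ks.filter (fun kw => PySem.Chars.isIn kw.toList c) := by
  intro ks
  induction ks with
  | nil => rfl
  | cons k ks' ih =>
    by_cases hk : PySem.Chars.isIn k.toList c
    · simp [pvScan, hk, ih]
    · simp [pvScan, hk, ih]

-- ===== VERDICT (by name: the statement is the Claim_ definition above) =====
theorem extract_key_topics_from_chat_spec : Claim_equal_extract_key_topics_from_chat := by
  intro messages _
  unfold Spec_extract_key_topics_from_chat extract_key_topics_from_chat
    extract_key_topics_from_chat_alt
  rw [pvScan_eq_filter]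
  apply List.filter_congr
  intro kw hkw
  rcases pvKeywords_facts kw hkw with ⟨hne, hnl⟩
  rw [Bool.eq_iff_iff]
  have hcont : ∀ (s : PySem.Set String), PySem.Set.contains s kw = true ↔ kw ∈ s := by
    intro s; simp [PySem.Set.contains]
  rw [hcont, pv_mem_outer, PySem.Chars.isIn_iff_infix, pvCombined,
    pv_infix_join hnl hne (messages.map (fun m => PySem.Chars.lower m.toList))]
  constructor
  · rintro (h | ⟨m, hm, _, hs⟩)
    · exact absurd h (List.not_mem_nil)
    · exact ⟨PySem.Chars.lower m.toList, List.mem_map.mpr ⟨m, hm, rfl⟩,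
        (PySem.Str.toList_lower m) ▸ (PySem.Str.isIn_iff_infix _ _).mp hs⟩
  · rintro ⟨p, hp, hinf⟩
    rcases List.mem_map.mp hp with ⟨m, hm, rfl⟩
    exact Or.inr ⟨m, hm, hkw,
      (PySem.Str.isIn_iff_infix _ _).mpr ((PySem.Str.toList_lower m) ▸ hinf)⟩
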